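-- pv_equiv track=rewrite | github.com/NuthanReddy/Nuthan | Problems/NonOverlappingZeroSegments.py | max_beautiful_segments
-- ===== SOURCE A (Python) =====
-- def max_beautiful_segments(n, arr):
--     prefix_sum = 0
--     prefix_map = {0: -1}
--     beautiful_segments = 0
--     last_index = -1
--
--     for i in range(n):
--         prefix_sum += arr[i]
--
--         if prefix_sum in prefix_map:
--             if prefix_map[prefix_sum] >= last_index:
--                 beautiful_segments += 1
--                 last_index = i
--         prefix_map[prefix_sum] = i
--
--     return beautiful_segments
-- ===== SOURCE B (Python) =====
-- def max_beautiful_segments(n, arr):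
--     s = 0
--     seen = {0}
--     count = 0
--     for i in range(n):
--         s += arr[i]
--         if s in seen:
--             count += 1
--             seen = {s}
--         else:
--             seen.add(s)
--     return count
-- ===== Notes on version B (the rewrite author's own statement) =====
-- stated objective: simpler
-- what changed: Replaces the dict of last prefix-sum indices plus a last_index barrier with a resettable membership set of prefix sums seen in the current window (reset to {s} when a segment is counted), eliminating all index bookkeeping.
import Mathlib
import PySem

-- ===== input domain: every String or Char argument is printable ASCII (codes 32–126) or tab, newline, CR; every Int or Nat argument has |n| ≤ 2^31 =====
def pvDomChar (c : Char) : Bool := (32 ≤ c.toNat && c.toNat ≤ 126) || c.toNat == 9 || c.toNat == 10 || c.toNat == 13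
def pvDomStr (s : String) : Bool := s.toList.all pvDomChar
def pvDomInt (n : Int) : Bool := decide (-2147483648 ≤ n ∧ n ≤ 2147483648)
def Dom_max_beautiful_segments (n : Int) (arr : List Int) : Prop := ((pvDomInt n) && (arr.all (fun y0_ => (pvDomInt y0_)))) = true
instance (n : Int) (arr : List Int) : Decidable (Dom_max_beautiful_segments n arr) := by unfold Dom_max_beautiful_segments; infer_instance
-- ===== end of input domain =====

-- B replaces the dict of last indices + last_index barrier with a resettable set of
-- prefix sums seen in the current window; objective: simpler state and control flow.

-- ===== PORT A =====
-- loop body of A: state = (prefix_sum, prefix_map, beautiful_segments, last_index)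
def stepA (arr : List Int) (st : Int × PySem.Dict Int Int × Int × Int) (i : Int) :
    Int × PySem.Dict Int Int × Int × Int :=
  let ps := st.1 + PySem.List.pyGetD arr i 0   -- arr[i]; total form, in range under Pre_
  match st.2.1.get? ps with
  | some j =>
      if j ≥ st.2.2.2 then (ps, st.2.1.insert ps i, st.2.2.1 + 1, i)
      else (ps, st.2.1.insert ps i, st.2.2.1, st.2.2.2)
  | none => (ps, st.2.1.insert ps i, st.2.2.1, st.2.2.2)

def max_beautiful_segments (n : Int) (arr : List Int) : Int :=
  ((PySem.List.pyRange 0 n 1).foldl (stepA arr)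
    (0, (PySem.Dict.empty.insert 0 (-1)), 0, -1)).2.2.1

-- ===== PORT B =====
-- loop body of B: state = (s, seen, count)
def stepB (arr : List Int) (st : Int × PySem.Set Int × Int) (i : Int) :
    Int × PySem.Set Int × Int :=
  let s := st.1 + PySem.List.pyGetD arr i 0
  if PySem.Set.contains st.2.1 s then (s, PySem.Set.ofList [s], st.2.2 + 1)
  else (s, PySem.Set.add st.2.1 s, st.2.2)

def max_beautiful_segments_alt (n : Int) (arr : List Int) : Int :=
  ((PySem.List.pyRange 0 n 1).foldl (stepB arr)
    (0, PySem.Set.ofList [0], 0)).2.2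

-- ===== PRECONDITION & SPEC =====
-- Pre_ excludes n > len(arr), on which both Pythons raise IndexError at arr[i].
def Pre_max_beautiful_segments (n : Int) (arr : List Int) : Prop := n ≤ (arr.length : Int)
instance (n : Int) (arr : List Int) : Decidable (Pre_max_beautiful_segments n arr) := by
  unfold Pre_max_beautiful_segments; infer_instance
def pvWitness_max_beautiful_segments : Int × List Int := (4, [1, -1, 2, -2])

def Spec_max_beautiful_segments (n : Int) (arr : List Int) (out : Int) : Prop := out = max_beautiful_segments_alt n arr
instance (n : Int) (arr : List Int) (out : Int) : Decidable (Spec_max_beautiful_segments n arr out) := by unfold Spec_max_beautiful_segments; infer_instance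

-- ===== CLAIM (what is proved, stated in full; the proofs are below) =====
def Claim_equal_max_beautiful_segments : Prop := ∀ (n : Int) (arr : List Int), Dom_max_beautiful_segments n arr → Pre_max_beautiful_segments n arr → Spec_max_beautiful_segments n arr (max_beautiful_segments n arr)

-- ===== LEMMAS AND PROOFS =====

-- Invariant linking A's state to B's state before processing index i:
-- same running sum and count; last_index < i; all map values < i; and a prefix sum
-- is in B's set iff A's map holds it with a value ≥ last_index.
def LoopInv (i : Int) (stA : Int × PySem.Dict Int Int × Int × Int)
    (stB : Int × PySem.Set Int × Int) : Prop :=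
  stA.1 = stB.1 ∧ stA.2.2.1 = stB.2.2 ∧ stA.2.2.2 < i ∧
  (∀ k v, stA.2.1.get? k = some v → v < i) ∧
  (∀ x, (∃ v, stA.2.1.get? x = some v ∧ stA.2.2.2 ≤ v) ↔ x ∈ stB.2.1)

lemma step_inv (arr : List Int) (a : Int) (stA : Int × PySem.Dict Int Int × Int × Int)
    (stB : Int × PySem.Set Int × Int) (h : LoopInv a stA stB) :
    LoopInv (a + 1) (stepA arr stA a) (stepB arr stB a) := by
  obtain ⟨hsum, hcnt, hli, hvals, hmem⟩ := h
  simp only [stepA, stepB, hsum]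
  set s := stB.1 + PySem.List.pyGetD arr a 0 with hs
  by_cases hc : s ∈ stB.2.1
  · -- s already seen in current window
    have hcT : PySem.Set.contains stB.2.1 s = true := (PySem.Set.contains_iff _ _).mpr hc
    obtain ⟨v, hv, hvli⟩ := (hmem s).mpr hc
    rw [hv, hcT]
    simp only [ge_iff_le, hvli, if_true]
    refine ⟨rfl, ?_, ?_, ?_, ?_⟩
    · dsimp only; omega
    · dsimp only; omega
    · dsimp only
      intro k w hw
      by_cases hks : k = s
      · subst hks; rw [PySem.Dict.get?_insert_self] at hw
        cases hw; omega
      · rw [PySem.Dict.get?_insert_of_ne _ _ hks] at hw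
        have := hvals k w hw; omega
    · dsimp only
      intro x
      by_cases hxs : x = s
      · subst hxs
        simp [PySem.Dict.get?_insert_self, PySem.Set.ofList, PySem.Set.add, PySem.Set.contains]
      · rw [PySem.Dict.get?_insert_of_ne _ _ hxs]
        constructor
        · rintro ⟨w, hw, haw⟩
          have := hvals x w hw; omega
        · intro hx
          exfalso
          have hx' : x ∈ ([s] : List Int) := by
            simpa [PySem.Set.ofList, PySem.Set.add, PySem.Set.empty, PySem.Set.contains] using hx
          simp at hx'
          exact hxs hx'
  · -- s not in current window (map has stale entry or no entry)
    have hcF : PySem.Set.contains stB.2.1 s = false := by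
      rw [← Bool.not_eq_true, PySem.Set.contains_iff _ _]; exact hc
    rw [hcF]
    simp only [if_false, Bool.false_eq_true]
    have hnot : ¬ ∃ v, stA.2.1.get? s = some v ∧ stA.2.2.2 ≤ v := fun hx => hc ((hmem s).mp hx)
    have hgoal : LoopInv (a + 1) (s, stA.2.1.insert s a, stA.2.2.1, stA.2.2.2)
        (s, PySem.Set.add stB.2.1 s, stB.2.2) := by
      refine ⟨rfl, hcnt, by dsimp only; omega, ?_, ?_⟩
      · dsimp only
        intro k w hw
        by_cases hks : k = s
        · subst hks; rw [PySem.Dict.get?_insert_self] at hw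
          cases hw; omega
        · rw [PySem.Dict.get?_insert_of_ne _ _ hks] at hw
          have := hvals k w hw; omega
      · dsimp only
        intro x
        rw [PySem.Set.mem_add]
        by_cases hxs : x = s
        · subst hxs
          simp only [PySem.Dict.get?_insert_self]
          exact ⟨fun _ => Or.inr trivial, fun _ => ⟨a, rfl, by omega⟩⟩
        · rw [PySem.Dict.get?_insert_of_ne _ _ hxs, hmem x]
          exact ⟨Or.inl, fun hx => hx.resolve_right hxs⟩
    cases hg : stA.2.1.get? s with
    | none => exact hgoal
    | some j =>
        have hjli : ¬ j ≥ stA.2.2.2 := fun hj => hnot ⟨j, hg, hj⟩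
        simp only [ge_iff_le] at hjli
        simp only [ge_iff_le, hjli, if_false]
        exact hgoal

lemma fold_inv (arr : List Int) : ∀ (k : Nat) (a : Int)
    (stA : Int × PySem.Dict Int Int × Int × Int) (stB : Int × PySem.Set Int × Int),
    LoopInv a stA stB →
    LoopInv (a + k) ((PySem.List.pyRange a (a + k) 1).foldl (stepA arr) stA)
      ((PySem.List.pyRange a (a + k) 1).foldl (stepB arr) stB) := by
  intro k
  induction k with
  | zero =>
      intro a stA stB h
      rw [PySem.List.pyRange_one_eq_nil (by omega)]
      simpa using h
  | succ m ih =>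
      intro a stA stB h
      rw [PySem.List.pyRange_one_cons (by omega : a < a + (m + 1 : Nat))]
      simp only [List.foldl_cons]
      have := ih (a + 1) (stepA arr stA a) (stepB arr stB a) (step_inv arr a stA stB h)
      have harith : a + 1 + (m : Int) = a + ((m : Nat) + 1 : Nat) := by push_cast; ring
      rwa [harith] at this

lemma inv_init : LoopInv 0 (0, (PySem.Dict.empty.insert 0 (-1)), 0, -1) (0, PySem.Set.ofList [0], 0) := by
  refine ⟨rfl, rfl, by dsimp only; omega, ?_, ?_⟩
  · intro k v hv
    by_cases hk : k = 0
    · subst hk; rw [PySem.Dict.get?_insert_self] at hv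
      cases hv; omega
    · rw [PySem.Dict.get?_insert_of_ne _ _ hk, PySem.Dict.get?_empty] at hv; cases hv
  · intro x
    by_cases hx : x = 0
    · subst hx
      simp [PySem.Dict.get?_insert_self, PySem.Set.ofList, PySem.Set.add]
    · rw [PySem.Dict.get?_insert_of_ne _ _ hx, PySem.Dict.get?_empty]
      simp [PySem.Set.ofList, PySem.Set.add, hx]

-- ===== VERDICT (by name: the statement is the Claim_ definition above) =====
theorem max_beautiful_segments_spec : Claim_equal_max_beautiful_segments := by
  intro n arr _ _
  unfold Spec_max_beautiful_segments max_beautiful_segments max_beautiful_segments_alt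
  by_cases hn : n ≤ 0
  · rw [PySem.List.pyRange_one_eq_nil hn]; rfl
  · have hn0 : (0 : Int) + (n.toNat : Int) = n := by omega
    have := fold_inv arr n.toNat 0 (0, (PySem.Dict.empty.insert 0 (-1)), 0, -1)
      (0, PySem.Set.ofList [0], 0) inv_init
    rw [hn0] at this
    exact this.2.1
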